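-- pv_equiv track=rewrite | github.com/NickSto/pcr | correct.py | count_barcodes
-- ===== SOURCE A (Python) =====
-- def count_barcodes(families):
--   """Tally how many times each barcode appears in the raw data.
--   Returns two lists: "votes" and "barcodes". In both, each element corresponds to a different
--   barcode, in the order it appears in families. But the first element is None, to correspond with
--   the 1-based read names in the alignment. So, you should be able to look up info on each barcode
--   by taking its read name in the alignment and using it as an index into these lists.
--   Elements in "votes" are integers representing how many times each barcode appears.
--   Elements in "barcodes" are the barcode strings themselves."""
--   votes = []
--   barcodes = []
--   vote = -999999
--   last_barcode = None
--   for line in families: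
--     fields = line.rstrip('\r\n').split('\t')
--     barcode = fields[0]
--     if barcode != last_barcode:
--       votes.append(vote)
--       barcodes.append(last_barcode)
--       vote = 0
--       last_barcode = barcode
--     vote += 1
--   votes.append(vote)
--   barcodes.append(last_barcode)
--   return votes, barcodes
-- ===== SOURCE B (Python) =====
-- def count_barcodes(families):
--   keys = [line.rstrip('\r\n').split('\t')[0] for line in families]
--   n = len(keys)
--   starts = [i for i in range(n) if i == 0 or keys[i] != keys[i-1]]
--   ends = starts[1:] + [n]
--   votes = [-999999] + [e - s for s, e in zip(starts, ends)]
--   barcodes = [None] + [keys[s] for s in starts]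
--   return votes, barcodes
-- ===== Notes on version B (the rewrite author's own statement) =====
-- stated objective: alternative
-- what changed: B computes the run boundaries as the list of indices where the barcode differs from its predecessor and derives each count by subtracting consecutive boundary positions (staged comprehensions, no running counter or carried last/vote state), instead of A's single stateful loop that increments a vote counter and emits each run one change-point late.
import Mathlib
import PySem

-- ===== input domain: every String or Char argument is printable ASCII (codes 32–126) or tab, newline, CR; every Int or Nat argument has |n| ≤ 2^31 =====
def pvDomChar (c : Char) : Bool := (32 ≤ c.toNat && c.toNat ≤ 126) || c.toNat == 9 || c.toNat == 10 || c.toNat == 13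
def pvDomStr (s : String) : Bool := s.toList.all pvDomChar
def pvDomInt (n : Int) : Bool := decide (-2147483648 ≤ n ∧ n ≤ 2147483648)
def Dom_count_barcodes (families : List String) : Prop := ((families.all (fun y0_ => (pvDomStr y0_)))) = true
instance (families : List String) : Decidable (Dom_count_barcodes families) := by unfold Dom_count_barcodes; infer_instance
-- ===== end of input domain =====

-- B replaces A's stateful vote/last_barcode loop by a boundary-index computation: it lists the
-- indices where the barcode changes and obtains each count as a difference of consecutive
-- boundary positions (objective: alternative; same O(n) cost).

-- ===== PORT A =====
-- line.rstrip('\r\n'): drop '\r'/'\n' characters from the right end (exact hand port; PySem has no rstrip-with-chars)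
def pvRstripCRLF (s : String) : String :=
  String.ofList ((s.toList.reverse.dropWhile (fun c => c == '\r' || c == '\n')).reverse)

-- fields = line.rstrip('\r\n').split('\t'); barcode = fields[0]  (str.split with a separator never returns [])
def pvBarcodeA (line : String) : String :=
  ((PySem.Str.split? (pvRstripCRLF line) "\t").getD []).headD ""

-- one iteration of A's for-loop over (votes, barcodes, vote, last_barcode)
def pvStepA (st : List Int × List (Option String) × Int × Option String) (line : String) :
    List Int × List (Option String) × Int × Option String :=
  let barcode := pvBarcodeA line
  let (votes, barcodes, vote, last) := st
  let (votes, barcodes, vote, last) :=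
    if some barcode ≠ last then (votes ++ [vote], barcodes ++ [last], 0, some barcode)
    else (votes, barcodes, vote, last)
  (votes, barcodes, vote + 1, last)

def count_barcodes (families : List String) : List Int × List (Option String) :=
  let st := families.foldl pvStepA ([], [], -999999, none)
  (st.1 ++ [st.2.2.1], st.2.1 ++ [st.2.2.2])

-- ===== PORT B =====
def pvKeyB (line : String) : String :=
  ((PySem.Str.split? (pvRstripCRLF line) "\t").getD []).headD ""

def count_barcodes_alt (families : List String) : List Int × List (Option String) :=
  let keys := families.map pvKeyB
  let n := keys.length
  let starts := (List.range n).filter (fun i => i == 0 || keys.getD i "" != keys.getD (i - 1) "")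
  let ends := starts.drop 1 ++ [n]
  ((-999999 : Int) :: (starts.zip ends).map (fun p => (p.2 : Int) - (p.1 : Int)),
   none :: starts.map (fun s => some (keys.getD s "")))

-- ===== PRECONDITION & SPEC =====
def Spec_count_barcodes (families : List String) (out : List Int × List (Option String)) : Prop := out = count_barcodes_alt families
instance (families : List String) (out : List Int × List (Option String)) : Decidable (Spec_count_barcodes families out) := by unfold Spec_count_barcodes; infer_instance

-- ===== CLAIM (what is proved, stated in full; the proofs are below) =====
def Claim_equal_count_barcodes : Prop := ∀ (families : List String), Dom_count_barcodes families → Spec_count_barcodes families (count_barcodes families)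

-- ===== LEMMAS AND PROOFS =====

-- A's loop on the precomputed key sequence
def pvStepK (st : List Int × List (Option String) × Int × Option String) (k : String) :
    List Int × List (Option String) × Int × Option String :=
  let (votes, barcodes, vote, last) := st
  let (votes, barcodes, vote, last) :=
    if some k ≠ last then (votes ++ [vote], barcodes ++ [last], 0, some k)
    else (votes, barcodes, vote, last)
  (votes, barcodes, vote + 1, last)

-- B's boundary list on a key sequence
def pvStartsOf (keys : List String) : List Nat :=
  (List.range keys.length).filter (fun i => i == 0 || keys.getD i "" != keys.getD (i - 1) "")

-- differences of consecutive elements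
def pvAdjDiffs (l : List Nat) : List Int :=
  (l.zip (l.drop 1)).map (fun p => (p.2 : Int) - (p.1 : Int))

lemma pvAdjDiffs_cons_cons (x y : Nat) (r : List Nat) :
    pvAdjDiffs (x :: y :: r) = ((y : Int) - x) :: pvAdjDiffs (y :: r) := by
  simp [pvAdjDiffs]

lemma pvAdjDiffs_two (l : List Nat) (a b : Nat) :
    pvAdjDiffs (l ++ [a, b]) = pvAdjDiffs (l ++ [a]) ++ [(b : Int) - a] := by
  induction l with
  | nil => simp [pvAdjDiffs]
  | cons x l ih =>
      cases l with
      | nil => simp [pvAdjDiffs]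
      | cons y r =>
          simp only [List.cons_append, pvAdjDiffs_cons_cons] at *
          simp [ih]

lemma pvZipEnds (st : List Nat) (n : Nat) (h : st ≠ []) :
    (st.zip (st.drop 1 ++ [n])).map (fun p => (p.2 : Int) - (p.1 : Int))
      = pvAdjDiffs (st ++ [n]) := by
  induction st with
  | nil => exact absurd rfl h
  | cons x r ih =>
      cases r with
      | nil => simp [pvAdjDiffs]
      | cons y r' =>
          have h := ih (by simp)
          simp only [List.drop_succ_cons, List.drop_zero, List.cons_append] at h
          simp only [List.cons_append, List.drop_succ_cons, List.drop_zero, List.zip_cons_cons,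
            List.map_cons, pvAdjDiffs_cons_cons, h]

lemma pvStartsMem (keys : List String) : ∀ i ∈ pvStartsOf keys, i < keys.length := by
  intro i hi
  have := List.mem_filter.mp hi
  exact List.mem_range.mp this.1

lemma pvStartsOf_append (l : List String) (k : String) (hl : l ≠ []) :
    pvStartsOf (l ++ [k])
      = pvStartsOf l ++ (if l.getD (l.length - 1) "" ≠ k then [l.length] else []) := by
  unfold pvStartsOf
  rw [List.length_append, List.length_singleton, List.range_succ, List.filter_append]
  congr 1
  · apply List.filter_congr
    intro i hi
    have hi' : i < l.length := List.mem_range.mp hi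
    rw [List.getD_append _ _ _ _ hi', List.getD_append _ _ _ _ (by omega)]
  · have h0 : l.length ≠ 0 := by
      intro h; exact hl (List.eq_nil_of_length_eq_zero h)
    have hN : (l ++ [k]).getD l.length "" = k := by
      rw [List.getD_append_right _ _ _ _ (le_refl _)]
      simp
    have hN1 : (l ++ [k]).getD (l.length - 1) "" = l.getD (l.length - 1) "" :=
      List.getD_append _ _ _ _ (by omega)
    simp only [List.filter_singleton, hN, hN1]
    by_cases hne : l.getD (l.length - 1) "" = k
    · have hne' : l[l.length - 1]?.getD "" = k := by simpa [List.getD] using hne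
      rw [if_neg (not_not_intro hne)]
      simp [Bool.cond_eq_ite, h0, hne']
    · have hne' : ¬ l[l.length - 1]?.getD "" = k := by simpa [List.getD] using hne
      rw [if_pos hne]
      simp [Bool.cond_eq_ite, Ne.symm hne']

-- main invariant: A's loop state on a nonempty key list, expressed through B's boundary list
lemma pvInv (ks : List String) : ∀ (k : String),
    ∃ (ss : List Nat) (s : Nat), pvStartsOf (ks ++ [k]) = ss ++ [s] ∧
      (ks ++ [k]).foldl pvStepK ([], [], -999999, none)
        = (-999999 :: pvAdjDiffs (ss ++ [s]),
           none :: ss.map (fun i => some ((ks ++ [k]).getD i "")),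
           ((ks ++ [k]).length : Int) - (s : Int),
           some ((ks ++ [k]).getD s "")) ∧
      (ks ++ [k]).getD s "" = k := by
  induction ks using List.reverseRecOn with
  | nil =>
      intro k
      refine ⟨[], 0, ?_, ?_, by simp⟩
      · simp [pvStartsOf]
      · simp [pvStepK, pvAdjDiffs]
  | append_singleton ks k' ih =>
      intro k
      obtain ⟨ss, s, h1, h2, h3⟩ := ih k'
      set l := ks ++ [k'] with hl
      have hlne : l ≠ [] := by simp [hl]
      have hsmem : s < l.length := pvStartsMem l s (h1 ▸ (by simp))
      have hssmem : ∀ i ∈ ss, i < l.length := fun i hi =>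
        pvStartsMem l i (h1 ▸ List.mem_append_left _ hi)
      have hlast : l.getD (l.length - 1) "" = k' := by
        simp [hl, List.length_append]
      have hstarts := pvStartsOf_append l k hlne
      have hgetD : ∀ i, i < l.length → (l ++ [k]).getD i "" = l.getD i "" := fun i hi =>
        List.getD_append _ _ _ _ hi
      have hm : ss.map (fun i => some (l.getD i "")) = ss.map (fun i => some ((l ++ [k]).getD i "")) :=
        List.map_congr_left fun i hi => by rw [hgetD i (hssmem i hi)]
      have hfold : (l ++ [k]).foldl pvStepK ([], [], -999999, none)
          = pvStepK (l.foldl pvStepK ([], [], -999999, none)) k := by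
        rw [List.foldl_append]; rfl
      by_cases hk : k = k'
      · -- same barcode: no new boundary, vote increments
        refine ⟨ss, s, ?_, ?_, ?_⟩
        · rw [hstarts, if_neg (not_not_intro (hlast.trans hk.symm))]; simpa using h1
        · rw [hfold, h2]
          have hc : ¬(some k ≠ some (l.getD s "")) :=
            not_not_intro (congrArg some (hk.trans h3.symm))
          simp only [pvStepK, if_neg hc]
          rw [hgetD s hsmem, ← hm]
          simp only [Prod.mk.injEq, List.length_append, List.length_singleton, true_and, and_true]
          push_cast
          ring
        · exact (hgetD s hsmem).trans (h3.trans hk.symm)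
      · -- new barcode: boundary at index l.length, new run starts
        have hN : (l ++ [k]).getD l.length "" = k := by
          rw [List.getD_append_right _ _ _ _ (le_refl _)]; simp
        have hadj : pvAdjDiffs ((ss ++ [s]) ++ [l.length])
            = pvAdjDiffs (ss ++ [s]) ++ [(l.length : Int) - (s : Int)] := by
          have h := pvAdjDiffs_two ss s l.length
          rw [List.append_assoc]
          simpa using h
        refine ⟨ss ++ [s], l.length, ?_, ?_, hN⟩
        · rw [hstarts, if_pos (by rw [hlast]; exact fun h => hk h.symm), h1, List.append_assoc]
        · rw [hfold, h2]
          have hc : some k ≠ some (l.getD s "") :=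
            fun h => hk ((Option.some.inj h).trans h3)
          simp only [pvStepK, if_pos hc]
          rw [hN, hadj, List.map_append]
          simp only [List.map_cons, List.map_nil]
          rw [hgetD s hsmem, ← hm]
          simp only [Prod.mk.injEq, List.length_append, List.length_singleton, and_true]
          refine ⟨by simp, by simp, by push_cast; ring⟩

-- ===== VERDICT (by name: the statement is the Claim_ definition above) =====
theorem count_barcodes_spec : Claim_equal_count_barcodes := by
  intro families _
  show count_barcodes families = count_barcodes_alt families
  rcases List.eq_nil_or_concat families with h | ⟨l, x, h⟩
  · subst h; rfl
  · subst h
    simp only [List.concat_eq_append]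
    have hmap : (l ++ [x]).map pvKeyB = l.map pvKeyB ++ [pvKeyB x] := by simp
    have hfold : (l ++ [x]).foldl pvStepA ([], [], -999999, none)
        = ((l.map pvKeyB) ++ [pvKeyB x]).foldl pvStepK ([], [], -999999, none) := by
      rw [← hmap, List.foldl_map]; rfl
    obtain ⟨ss, s, h1, h2, _⟩ := pvInv (l.map pvKeyB) (pvKeyB x)
    simp only [count_barcodes, count_barcodes_alt]
    rw [hfold, h2, hmap]
    have hst : (List.range (l.map pvKeyB ++ [pvKeyB x]).length).filter
        (fun i => i == 0 || (l.map pvKeyB ++ [pvKeyB x]).getD i ""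
          != (l.map pvKeyB ++ [pvKeyB x]).getD (i - 1) "") = ss ++ [s] := h1
    rw [hst, pvZipEnds (ss ++ [s]) (l.map pvKeyB ++ [pvKeyB x]).length (by simp)]
    simp [pvAdjDiffs_two, List.append_assoc]
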